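-- pv_equiv track=rewrite | github.com/suyashbambaras/edulab-set2-algo-q2 | q2.py | count_fibonacci_numbers
-- ===== SOURCE A (Python) =====
-- def is_fibonacci(num, fib_set):
--
--     return num in fib_set
--
-- def generate_fibonacci_up_to(max_num):
--
--     fib_set = set()
--     a, b = 0, 1
--     while a <= max_num:
--         fib_set.add(a)
--         a, b = b, a + b
--     return fib_set
--
-- def count_fibonacci_numbers(arr):
--     if not arr:
--         return 0
--     max_number = max(arr)
--     fib_set = generate_fibonacci_up_to(max_number)
--
--     count = 0
--
--     for num in arr:
--         if is_fibonacci(num, fib_set):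
--             count += 1
--
--     return count
-- ===== SOURCE B (Python) =====
-- def count_fibonacci_numbers(arr):
--     # Single pass, no precomputed set: test each element directly by walking
--     # the Fibonacci sequence until it reaches or passes the element.
--     def is_fib(x):
--         a, b = 0, 1
--         while a < x:
--             a, b = b, a + b
--         return a == x
--     return sum(1 for x in arr if is_fib(x))
-- ===== Notes on version B (the rewrite author's own statement) =====
-- stated objective: simpler
-- what changed: B drops the max(arr)-bounded Fibonacci set entirely and tests each element with a direct per-element Fibonacci walk (while a < x), summing matches in one pass.
import Mathlib
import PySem

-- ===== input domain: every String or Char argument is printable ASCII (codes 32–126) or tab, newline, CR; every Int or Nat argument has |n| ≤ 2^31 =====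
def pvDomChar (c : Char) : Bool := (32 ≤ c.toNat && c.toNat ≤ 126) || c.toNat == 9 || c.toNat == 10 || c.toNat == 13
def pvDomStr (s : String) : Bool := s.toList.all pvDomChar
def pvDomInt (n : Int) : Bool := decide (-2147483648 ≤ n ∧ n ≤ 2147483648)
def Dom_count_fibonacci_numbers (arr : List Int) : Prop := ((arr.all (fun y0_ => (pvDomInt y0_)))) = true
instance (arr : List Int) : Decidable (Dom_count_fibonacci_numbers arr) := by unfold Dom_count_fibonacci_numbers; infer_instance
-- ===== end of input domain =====

-- B replaces A's max(arr)-bounded Fibonacci set by a per-element Fibonacci walk (simpler, one pass, no set).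
-- Both loop ports use a fuel argument solely as a totality guard; the fuel provably exceeds the number of
-- iterations (the measure fuelM below strictly decreases), so the fuel-exhausted branch is never reached.

-- ===== PORT A =====
-- A's while loop 'while a <= max_num: fib_set.add(a); a, b = b, a+b' starting from (0, 1).
def genFibF : Nat → Int → Int → Int → PySem.Set Int → PySem.Set Int
  | 0, _, _, _, s => s
  | f + 1, maxn, a, b, s => if a ≤ maxn then genFibF f maxn b (a + b) (PySem.Set.add s a) else s

def count_fibonacci_numbers (arr : List Int) : Int :=
  if arr = [] then 0
  else
    match PySem.List.max? arr (fun x => x) with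
    | none => 0
    | some max_number =>
      let fib_set := genFibF (2 * (max_number + 1).toNat + 1) max_number 0 1 PySem.Set.empty
      arr.foldl (fun count num => if PySem.Set.contains fib_set num then count + 1 else count) 0

-- ===== PORT B =====
-- B's inner 'while a < x: a, b = b, a + b' followed by 'return a == x'.
def isFibF : Nat → Int → Int → Int → Bool
  | 0, _, _, _ => false
  | g + 1, x, a, b => if a < x then isFibF g x b (a + b) else decide (a = x)

def count_fibonacci_numbers_alt (arr : List Int) : Int :=
  arr.foldl (fun c x => if isFibF (2 * (x + 1).toNat + 1) x 0 1 then c + 1 else c) 0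

-- ===== PRECONDITION & SPEC =====
def Spec_count_fibonacci_numbers (arr : List Int) (out : Int) : Prop := out = count_fibonacci_numbers_alt arr
instance (arr : List Int) (out : Int) : Decidable (Spec_count_fibonacci_numbers arr out) := by unfold Spec_count_fibonacci_numbers; infer_instance

-- ===== CLAIM (what is proved, stated in full; the proofs are below) =====
def Claim_equal_count_fibonacci_numbers : Prop := ∀ (arr : List Int), Dom_count_fibonacci_numbers arr → Spec_count_fibonacci_numbers arr (count_fibonacci_numbers arr)

-- ===== LEMMAS AND PROOFS =====

-- loop measure: the number of remaining iterations of either loop is bounded by fuelM c a b (c = maxn resp. x)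
def fuelM (c a b : Int) : Nat := 2 * (c + 1 - a).toNat + (if a = b then 1 else 0)

lemma fuelM_step (c a b : Int) (_h0 : 0 ≤ a) (hab : a ≤ b) (hb : 0 < b) (hle : a ≤ c) :
    fuelM c b (a + b) < fuelM c a b := by
  unfold fuelM
  split_ifs <;> omega

lemma mem_genFibF_of_mem (x : Int) : ∀ (f : Nat) (maxn a b : Int) (s : PySem.Set Int),
    x ∈ s → x ∈ genFibF f maxn a b s := by
  intro f
  induction f with
  | zero => intro maxn a b s hx; exact hx
  | succ f ih =>
    intro maxn a b s hx
    rw [genFibF]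
    by_cases hle : a ≤ maxn
    · rw [if_pos hle]
      exact ih maxn b (a + b) _ (by rw [PySem.Set.mem_add]; exact Or.inl hx)
    · rw [if_neg hle]; exact hx

lemma mem_genFibF_of_lt (x : Int) : ∀ (f : Nat) (maxn a b : Int) (s : PySem.Set Int),
    0 ≤ a → a ≤ b → x < a → (x ∈ genFibF f maxn a b s ↔ x ∈ s) := by
  intro f
  induction f with
  | zero => intro maxn a b s _ _ _; exact Iff.rfl
  | succ f ih =>
    intro maxn a b s h0 hab hxa
    rw [genFibF]
    by_cases hle : a ≤ maxn
    · rw [if_pos hle, ih maxn b (a + b) _ (by omega) (by omega) (by omega), PySem.Set.mem_add]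
      constructor
      · rintro (hs | rfl)
        · exact hs
        · exact absurd hxa (lt_irrefl x)
      · exact Or.inl
    · rw [if_neg hle]

lemma mem_genFibF_iff (x : Int) : ∀ (f g : Nat) (maxn a b : Int) (s : PySem.Set Int),
    0 ≤ a → a ≤ b → 0 < b → x ≤ maxn → fuelM maxn a b < f → fuelM x a b < g →
    (x ∈ genFibF f maxn a b s ↔ (x ∈ s ∨ isFibF g x a b = true)) := by
  intro f
  induction f with
  | zero => intro g maxn a b s _ _ _ _ hf _; exact absurd hf (Nat.not_lt_zero _)
  | succ f ih =>
    intro g maxn a b s h0 hab hb hx hf hg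
    obtain ⟨g', rfl⟩ : ∃ g', g = g' + 1 := ⟨g - 1, by omega⟩
    rw [genFibF, isFibF]
    by_cases hle : a ≤ maxn
    · rw [if_pos hle]
      by_cases hlt : a < x
      · rw [if_pos hlt,
          ih g' maxn b (a + b) _ (by omega) (by omega) (by omega) hx
            (by have := fuelM_step maxn a b h0 hab hb hle; omega)
            (by have := fuelM_step x a b h0 hab hb (by omega); omega),
          PySem.Set.mem_add]
        constructor
        · rintro ((hs | rfl) | hft)
          · exact Or.inl hs
          · exact absurd hlt (lt_irrefl x)
          · exact Or.inr hft
        · rintro (hs | hft)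
          · exact Or.inl (Or.inl hs)
          · exact Or.inr hft
      · rw [if_neg hlt]
        by_cases heq : a = x
        · subst heq
          simp only [decide_true, or_true, iff_true]
          exact mem_genFibF_of_mem a f maxn b (a + b) _ (by rw [PySem.Set.mem_add]; exact Or.inr rfl)
        · rw [mem_genFibF_of_lt x f maxn b (a + b) _ (by omega) (by omega) (by omega),
            PySem.Set.mem_add]
          constructor
          · rintro (hs | rfl)
            · exact Or.inl hs
            · exact absurd rfl heq
          · rintro (hs | hft)
            · exact Or.inl hs
            · rw [decide_eq_true_iff] at hft
              exact absurd hft heq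
    · rw [if_neg hle]
      have h1 : ¬ a < x := by omega
      have h2 : ¬ a = x := by omega
      rw [if_neg h1]
      constructor
      · exact Or.inl
      · rintro (hs | hft)
        · exact hs
        · rw [decide_eq_true_iff] at hft
          exact absurd hft h2

lemma contains_genFibF_eq_isFibF (m x : Int) (hx : x ≤ m) :
    PySem.Set.contains (genFibF (2 * (m + 1).toNat + 1) m 0 1 PySem.Set.empty) x
      = isFibF (2 * (x + 1).toNat + 1) x 0 1 := by
  have hmem := mem_genFibF_iff x (2 * (m + 1).toNat + 1) (2 * (x + 1).toNat + 1) m 0 1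
    PySem.Set.empty le_rfl (by omega) (by omega) hx
    (by unfold fuelM; norm_num) (by unfold fuelM; norm_num)
  simp only [PySem.Set.empty, List.not_mem_nil, false_or] at hmem
  cases hb : isFibF (2 * (x + 1).toNat + 1) x 0 1 with
  | true =>
    have h1 : x ∈ genFibF (2 * (m + 1).toNat + 1) m 0 1 ([] : PySem.Set Int) := hmem.mpr hb
    simp [PySem.Set.contains, PySem.Set.empty, h1]
  | false =>
    have h1 : x ∉ genFibF (2 * (m + 1).toNat + 1) m 0 1 ([] : PySem.Set Int) := by
      rw [hmem, hb]
      exact Bool.false_ne_true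
    simp [PySem.Set.contains, PySem.Set.empty, h1]

-- ===== VERDICT (by name: the statement is the Claim_ definition above) =====
theorem count_fibonacci_numbers_spec : Claim_equal_count_fibonacci_numbers := by
  intro arr _
  unfold Spec_count_fibonacci_numbers count_fibonacci_numbers count_fibonacci_numbers_alt
  by_cases hnil : arr = []
  · subst hnil; simp
  · simp only [hnil, if_false]
    cases hmax : PySem.List.max? arr (fun x => x) with
    | none => exact absurd ((PySem.List.max?_eq_none_iff arr _).mp hmax) hnil
    | some m =>
      apply PySem.List.foldl_congr_mem
      intro acc x hx
      rw [contains_genFibF_eq_isFibF m x (PySem.List.max?_isMax hmax x hx)]
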